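-- pv_equiv track=rewrite | github.com/dagster-io/erk | remove_tripwires.py | remove_tripwires
-- ===== SOURCE A (Python) =====
-- def remove_tripwires(content: str) -> str:
--     """Remove tripwires section from frontmatter."""
--     lines = content.split("\n")
--     in_frontmatter = False
--     in_tripwires = False
--     result = []
--
--     for line in lines:
--         if line.strip() == "---":
--             if not in_frontmatter:
--                 in_frontmatter = True
--                 result.append(line)
--             else:
--                 # End of frontmatter
--                 in_frontmatter = False
--                 in_tripwires = False
--                 result.append(line)
--         elif in_frontmatter and line.startswith("tripwires:"):
--             in_tripwires = True
--             # Don't add the tripwires: line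
--         elif in_tripwires:
--             # Skip all tripwire content until we hit a non-indented line or end of frontmatter
--             if line.startswith("  ") or line.startswith("\t") or line.strip() == "":
--                 # Skip this line (it's part of tripwires)
--                 continue
--             else:
--                 # This is the start of a new frontmatter field
--                 in_tripwires = False
--                 result.append(line)
--         else:
--             result.append(line)
--
--     return "\n".join(result)
-- ===== SOURCE B (Python) =====
-- def remove_tripwires(content: str) -> str:
--     """Remove tripwires section from frontmatter (index-based scan with a consuming inner loop)."""
--     lines = content.split("\n")
--     result = []
--     in_frontmatter = False
--     i = 0
--     n = len(lines)
--     while i < n: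
--         line = lines[i]
--         if line.strip() == "---":
--             in_frontmatter = not in_frontmatter
--             result.append(line)
--             i += 1
--         elif in_frontmatter and line.startswith("tripwires:"):
--             # consume the whole tripwires block here; the stopping line is
--             # handed back to the outer loop to be processed normally
--             i += 1
--             while i < n:
--                 cur = lines[i]
--                 if cur.strip() == "---":
--                     break
--                 if (cur.startswith("  ") or cur.startswith("\t")
--                         or cur.strip() == "" or cur.startswith("tripwires:")):
--                     i += 1
--                 else:
--                     break
--         else:
--             result.append(line)
--             i += 1
--     return "\n".join(result)
-- ===== Notes on version B (the rewrite author's own statement) =====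
-- stated objective: alternative
-- what changed: Replaces A's single for-loop with two boolean state flags by an index-based outer loop keeping only the in_frontmatter flag, with a dedicated inner loop that consumes an entire tripwires block and hands the stopping line back to the outer loop.
import Mathlib
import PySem

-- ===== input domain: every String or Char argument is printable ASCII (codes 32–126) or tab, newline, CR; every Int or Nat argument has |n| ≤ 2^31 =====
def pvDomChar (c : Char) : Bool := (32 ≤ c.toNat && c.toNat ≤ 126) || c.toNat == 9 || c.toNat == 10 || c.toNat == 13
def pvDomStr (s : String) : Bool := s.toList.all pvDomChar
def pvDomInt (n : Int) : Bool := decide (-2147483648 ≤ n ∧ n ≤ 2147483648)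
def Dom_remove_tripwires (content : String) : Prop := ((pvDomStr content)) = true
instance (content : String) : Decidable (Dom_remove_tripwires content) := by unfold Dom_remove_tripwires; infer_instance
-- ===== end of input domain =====

-- B replaces A's two-flag for-loop by an index scan whose inner loop consumes a whole tripwires block (alternative decomposition, same cost).

-- ===== PORT A =====
-- loop body of A's for-loop; state = (result, in_frontmatter, in_tripwires)
def pvStepA (st : List String × Bool × Bool) (line : String) : List String × Bool × Bool :=
  let (result, in_fm, in_tw) := st
  if PySem.Str.strip line = "---" then
    if !in_fm then (result ++ [line], true, in_tw)
    else (result ++ [line], false, false)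
  else if in_fm && PySem.Str.startswith line "tripwires:" then (result, in_fm, true)
  else if in_tw then
    if PySem.Str.startswith line "  " || PySem.Str.startswith line "\t" || PySem.Str.strip line = "" then
      (result, in_fm, in_tw)
    else (result ++ [line], in_fm, false)
  else (result ++ [line], in_fm, in_tw)

def remove_tripwires (content : String) : String :=
  PySem.Str.join "\n" ((((PySem.Str.split? content "\n").getD [])).foldl pvStepA ([], false, false)).1

-- ===== PORT B =====
-- B's inner while loop: consume the tripwires block, return the remaining lines
def pvSkipTrip : List String → List String
  | [] => []
  | cur :: rest =>
    if PySem.Str.strip cur = "---" then cur :: rest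
    else if PySem.Str.startswith cur "  " || PySem.Str.startswith cur "\t"
          || PySem.Str.strip cur = "" || PySem.Str.startswith cur "tripwires:" then
      pvSkipTrip rest
    else cur :: rest

theorem pvSkipTrip_length_le : ∀ ls : List String, (pvSkipTrip ls).length ≤ ls.length := by
  intro ls
  induction ls with
  | nil => simp [pvSkipTrip]
  | cons c rest ih =>
    simp only [pvSkipTrip]
    split_ifs
    · exact Nat.le_refl _
    · exact le_trans ih (by simp)
    · exact Nat.le_refl _

-- B's outer while loop over the remaining lines, maintaining only in_frontmatter
def pvLoopB : List String → Bool → List String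
  | [], _ => []
  | line :: rest, in_fm =>
    if PySem.Str.strip line = "---" then line :: pvLoopB rest (!in_fm)
    else if in_fm && PySem.Str.startswith line "tripwires:" then pvLoopB (pvSkipTrip rest) in_fm
    else line :: pvLoopB rest in_fm
termination_by ls _ => ls.length
decreasing_by
  · simp
  · simpa using Nat.lt_succ_of_le (pvSkipTrip_length_le rest)
  · simp

def remove_tripwires_alt (content : String) : String :=
  PySem.Str.join "\n" (pvLoopB (((PySem.Str.split? content "\n").getD [])) false)

-- ===== PRECONDITION & SPEC =====
def Spec_remove_tripwires (content : String) (out : String) : Prop := out = remove_tripwires_alt content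
instance (content : String) (out : String) : Decidable (Spec_remove_tripwires content out) := by unfold Spec_remove_tripwires; infer_instance

-- ===== CLAIM (what is proved, stated in full; the proofs are below) =====
def Claim_equal_remove_tripwires : Prop := ∀ (content : String), Dom_remove_tripwires content → Spec_remove_tripwires content (remove_tripwires content)

-- ===== LEMMAS AND PROOFS =====

-- recursive characterisation of A's fold (proof-side only)
def pvAuxA : List String → Bool → Bool → List String
  | [], _, _ => []
  | line :: rest, in_fm, in_tw =>
    if PySem.Str.strip line = "---" then
      if !in_fm then line :: pvAuxA rest true in_tw
      else line :: pvAuxA rest false false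
    else if in_fm && PySem.Str.startswith line "tripwires:" then pvAuxA rest in_fm true
    else if in_tw then
      if PySem.Str.startswith line "  " || PySem.Str.startswith line "\t" || PySem.Str.strip line = "" then
        pvAuxA rest in_fm in_tw
      else line :: pvAuxA rest in_fm false
    else line :: pvAuxA rest in_fm in_tw

theorem foldA_eq_auxA : ∀ (lines : List String) (res : List String) (fm tw : Bool),
    (lines.foldl pvStepA (res, fm, tw)).1 = res ++ pvAuxA lines fm tw := by
  intro lines
  induction lines with
  | nil => intro res fm tw; simp [pvAuxA]
  | cons line rest ih =>
    intro res fm tw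
    simp only [List.foldl_cons, pvStepA, pvAuxA]
    split_ifs <;> simp [ih]

theorem auxA_eq_loopB : ∀ (lines : List String),
    (∀ fm : Bool, pvAuxA lines fm false = pvLoopB lines fm) ∧
      pvAuxA lines true true = pvLoopB (pvSkipTrip lines) true := by
  intro lines
  induction lines with
  | nil => exact ⟨fun fm => by simp [pvAuxA, pvLoopB], by simp [pvAuxA, pvSkipTrip, pvLoopB]⟩
  | cons line rest ih =>
    constructor
    · intro fm
      simp only [pvAuxA, pvLoopB]
      split_ifs with h1 h2 h2 <;>
        simp_all [(ih).1, (ih).2]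
    · simp only [pvAuxA, pvSkipTrip]
      split_ifs <;>
        simp_all [pvLoopB, (ih).1, (ih).2]

-- ===== VERDICT (by name: the statement is the Claim_ definition above) =====
theorem remove_tripwires_spec : Claim_equal_remove_tripwires := by
  intro content _
  unfold Spec_remove_tripwires remove_tripwires remove_tripwires_alt
  rw [foldA_eq_auxA, (auxA_eq_loopB _).1]
  simp
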